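-- pv_equiv track=rewrite | github.com/BalaShankar9/SecProbe | secprobe/ecosystem/bounty_triage.py | _estimate_severity
-- ===== SOURCE A (Python) =====
-- def _estimate_severity(vuln_type: str) -> str:
--     critical = {"sqli", "cmdi", "rce", "deserialization", "ssrf"}
--     high = {"xss", "auth", "idor", "lfi", "xxe", "ssti"}
--     medium = {"csrf", "cors", "redirect", "jwt", "nosql"}
--     low = {"headers", "cookies", "info"}
--
--     vt = vuln_type.lower()
--     if any(c in vt for c in critical):
--         return "CRITICAL"
--     if any(h in vt for h in high):
--         return "HIGH"
--     if any(m in vt for m in medium):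
--         return "MEDIUM"
--     return "LOW"
-- ===== SOURCE B (Python) =====
-- _RANK = {
--     "sqli": 3, "cmdi": 3, "rce": 3, "deserialization": 3, "ssrf": 3,
--     "xss": 2, "auth": 2, "idor": 2, "lfi": 2, "xxe": 2, "ssti": 2,
--     "csrf": 1, "cors": 1, "redirect": 1, "jwt": 1, "nosql": 1,
-- }
-- _LABEL = {3: "CRITICAL", 2: "HIGH", 1: "MEDIUM", 0: "LOW"}
--
-- def _estimate_severity(vuln_type: str) -> str:
--     vt = vuln_type.lower()
--     best = 0
--     for kw, rank in _RANK.items():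
--         if kw in vt:
--             best = max(best, rank)
--     return _LABEL[best]
-- ===== Notes on version B (the rewrite author's own statement) =====
-- stated objective: alternative
-- what changed: Replaced four ordered early-exit membership passes over per-level sets with one flat keyword-to-rank table, a single max-tracking scan over it, and a rank-to-label table lookup.
import Mathlib
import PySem

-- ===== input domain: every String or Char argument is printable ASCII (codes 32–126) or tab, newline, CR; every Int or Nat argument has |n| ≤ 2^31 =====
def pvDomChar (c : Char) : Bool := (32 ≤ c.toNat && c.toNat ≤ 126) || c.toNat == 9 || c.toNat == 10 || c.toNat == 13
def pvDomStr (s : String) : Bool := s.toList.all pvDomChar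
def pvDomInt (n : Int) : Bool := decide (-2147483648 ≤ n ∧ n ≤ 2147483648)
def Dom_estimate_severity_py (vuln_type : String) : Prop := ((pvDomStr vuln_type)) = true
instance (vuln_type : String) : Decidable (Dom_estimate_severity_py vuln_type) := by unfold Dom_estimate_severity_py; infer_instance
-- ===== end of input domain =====

-- B replaces A's four ordered early-exit membership passes by one flat keyword→rank table,
-- a single max-tracking scan, and a rank→label lookup (objective: alternative decomposition).


-- ===== PORT A =====
-- literal transliteration of _estimate_severity: four per-level sets, ordered early-exit checks
def estimate_severity_py (vuln_type : String) : String :=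
  let critical := PySem.Set.ofList ["sqli", "cmdi", "rce", "deserialization", "ssrf"]
  let high := PySem.Set.ofList ["xss", "auth", "idor", "lfi", "xxe", "ssti"]
  let medium := PySem.Set.ofList ["csrf", "cors", "redirect", "jwt", "nosql"]
  let _low := PySem.Set.ofList ["headers", "cookies", "info"]  -- defined but unused, as in A
  let vt := PySem.Str.lower vuln_type
  if critical.any (fun c => PySem.Str.isIn c vt) then "CRITICAL"
  else if high.any (fun h => PySem.Str.isIn h vt) then "HIGH"
  else if medium.any (fun m => PySem.Str.isIn m vt) then "MEDIUM"
  else "LOW"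

-- ===== PORT B =====
-- Source B's module-level tables: flat keyword→rank dict and rank→label dict
def pvRank : PySem.Dict String Int :=
  PySem.Dict.ofList
  [("sqli", 3), ("cmdi", 3), ("rce", 3), ("deserialization", 3), ("ssrf", 3),
   ("xss", 2), ("auth", 2), ("idor", 2), ("lfi", 2), ("xxe", 2), ("ssti", 2),
   ("csrf", 1), ("cors", 1), ("redirect", 1), ("jwt", 1), ("nosql", 1)]

def pvLabel : PySem.Dict Int String :=
  PySem.Dict.ofList
  [(3, "CRITICAL"), (2, "HIGH"), (1, "MEDIUM"), (0, "LOW")]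

-- single max-tracking pass over the flat table, then label lookup
-- (best is always a key of pvLabel, so the "" default of getD is never returned)
def estimate_severity_py_alt (vuln_type : String) : String :=
  let vt := PySem.Str.lower vuln_type
  let best := (PySem.Dict.items pvRank).foldl (fun b p => if PySem.Str.isIn p.1 vt then max b p.2 else b) 0
  PySem.Dict.getD pvLabel best ""

-- ===== PRECONDITION & SPEC =====
def Spec_estimate_severity_py (vuln_type : String) (out : String) : Prop := out = estimate_severity_py_alt vuln_type
instance (vuln_type : String) (out : String) : Decidable (Spec_estimate_severity_py vuln_type out) := by unfold Spec_estimate_severity_py; infer_instance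

-- ===== CLAIM (what is proved, stated in full; the proofs are below) =====
def Claim_equal_estimate_severity_py : Prop := ∀ (vuln_type : String), Dom_estimate_severity_py vuln_type → Spec_estimate_severity_py vuln_type (estimate_severity_py vuln_type)

-- ===== LEMMAS AND PROOFS =====

-- a max-tracking fold over keywords that all carry the same rank r is "max b r if any keyword hits, else b"
theorem pv_foldl_group (vt : String) (r : Int) (ks : List String) (b : Int) :
    (ks.map (fun k => (k, r))).foldl (fun b p => if PySem.Str.isIn p.1 vt then max b p.2 else b) b
      = if ks.any (fun k => PySem.Str.isIn k vt) then max b r else b := by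
  induction ks generalizing b with
  | nil => simp
  | cons k t ih =>
    simp only [List.map_cons, List.foldl_cons, List.any_cons, ih]
    by_cases hk : PySem.Str.isIn k vt = true <;>
      by_cases ht : (t.any fun k => PySem.Str.isIn k vt) = true <;>
        simp only [hk, ht, if_pos, Bool.true_or, Bool.false_or] <;> simp

theorem pv_main (vuln_type : String) :
    estimate_severity_py vuln_type = estimate_severity_py_alt vuln_type := by
  unfold estimate_severity_py estimate_severity_py_alt
  have hsplit : PySem.Dict.items pvRank =
      (["sqli", "cmdi", "rce", "deserialization", "ssrf"].map (fun k => (k, (3 : Int)))) ++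
      (["xss", "auth", "idor", "lfi", "xxe", "ssti"].map (fun k => (k, (2 : Int)))) ++
      (["csrf", "cors", "redirect", "jwt", "nosql"].map (fun k => (k, (1 : Int)))) := by decide
  have hc : PySem.Set.ofList ["sqli", "cmdi", "rce", "deserialization", "ssrf"]
      = ["sqli", "cmdi", "rce", "deserialization", "ssrf"] := by decide
  have hh : PySem.Set.ofList ["xss", "auth", "idor", "lfi", "xxe", "ssti"]
      = ["xss", "auth", "idor", "lfi", "xxe", "ssti"] := by decide
  have hm : PySem.Set.ofList ["csrf", "cors", "redirect", "jwt", "nosql"]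
      = ["csrf", "cors", "redirect", "jwt", "nosql"] := by decide
  simp only [hsplit, hc, hh, hm, List.foldl_append, pv_foldl_group]
  set vt := PySem.Str.lower vuln_type
  by_cases h3 : (["sqli", "cmdi", "rce", "deserialization", "ssrf"].any (fun k => PySem.Str.isIn k vt)) = true <;>
  by_cases h2 : (["xss", "auth", "idor", "lfi", "xxe", "ssti"].any (fun k => PySem.Str.isIn k vt)) = true <;>
  by_cases h1 : (["csrf", "cors", "redirect", "jwt", "nosql"].any (fun k => PySem.Str.isIn k vt)) = true <;>
    simp only [h3, h2, h1, if_true] <;> simp <;> decide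

-- ===== VERDICT (by name: the statement is the Claim_ definition above) =====
theorem estimate_severity_py_spec : Claim_equal_estimate_severity_py := by
  intro vuln_type _
  unfold Spec_estimate_severity_py
  exact pv_main vuln_type
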